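-- pv_equiv track=rewrite | github.com/adnaniazi/capfinder | src/capfinder/find_ote_test.py | make_coordinates
-- ===== SOURCE A (Python) =====
-- from typing import Any, Dict, List, Tuple
--
-- def make_coordinates(aln_str: str, ref_str: str) -> List[int]:
--     """
--     Walk along the alignment string and make an incrementing index
--     where there is a match, mismatch, and deletions. For gaps in
--     the alignment string, it output a -1 in the index list.
--
--     Args:
--         aln_str (str): The alignment string.
--         ref_str (str): The reference string.
--
--     Returns:
--         coord_list (list): A list of indices corresponding to the alignment string.
--     """
--     # Make index coordinates along the alignment string
--     coord_list = []
--     cnt = 0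
--     for idx, aln_chr in enumerate(aln_str):
--         if aln_chr != " ":
--             coord_list.append(cnt)
--             cnt += 1
--         else:
--             if ref_str[idx] != "-":  # handle deletions
--                 coord_list.append(cnt)
--                 cnt += 1
--             else:
--                 coord_list.append(-1)
--
--     # Go in reverse in the coord_list, and put -1 of all the places
--     # where there is a gap in the alignment string. Break out when the
--     # first non-gap character is encountered.
--     for idx in range(len(coord_list) - 1, -1, -1):
--         if aln_str[idx] == " ":
--             coord_list[idx] = -1
--         else:
--             break
--     return coord_list
-- ===== SOURCE B (Python) =====
-- def make_coordinates(aln_str, ref_str):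
--     # single forward pass; trailing-gap boundary precomputed instead of A's reverse overwrite pass
--     last = len(aln_str.rstrip(' ')) - 1
--     coord_list = []
--     cnt = 0
--     for idx, aln_chr in enumerate(aln_str):
--         if idx > last:
--             coord_list.append(-1)
--         elif aln_chr != ' ' or ref_str[idx] != '-':
--             coord_list.append(cnt)
--             cnt += 1
--         else:
--             coord_list.append(-1)
--     return coord_list
-- ===== Notes on version B (the rewrite author's own statement) =====
-- stated objective: simpler
-- what changed: A's two passes (forward build, then reverse overwrite of trailing gaps) are fused into one forward pass over enumerate with the trailing-gap boundary precomputed as len(aln_str.rstrip(' ')) - 1.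
import Mathlib
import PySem

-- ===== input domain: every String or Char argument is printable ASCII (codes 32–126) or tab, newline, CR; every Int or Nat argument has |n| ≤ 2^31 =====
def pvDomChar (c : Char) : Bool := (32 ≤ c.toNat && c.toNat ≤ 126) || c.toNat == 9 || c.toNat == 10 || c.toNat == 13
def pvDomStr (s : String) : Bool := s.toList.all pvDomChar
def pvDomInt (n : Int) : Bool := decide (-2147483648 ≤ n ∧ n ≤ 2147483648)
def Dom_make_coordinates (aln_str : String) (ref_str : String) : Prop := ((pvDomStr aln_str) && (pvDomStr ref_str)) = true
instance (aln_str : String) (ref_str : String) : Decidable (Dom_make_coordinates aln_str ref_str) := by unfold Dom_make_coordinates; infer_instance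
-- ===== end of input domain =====

-- B fuses A's forward pass and reverse trailing-gap overwrite into one pass with a precomputed
-- rstrip boundary (objective: simpler); return values proved equal wherever A returns.

-- ===== PORT A =====
-- forward pass of A; ref_str[idx] ported with pyGet? — none (Python IndexError, excluded by Pre_)
-- is defaulted to '-' only to keep the port total
def pvFwdA (l : List Char) (r : List Char) (idx : Nat) (cnt : Int) : List Int :=
  match l with
  | [] => []
  | c :: rest =>
    if c ≠ ' ' then cnt :: pvFwdA rest r (idx + 1) (cnt + 1)
    else if (PySem.List.pyGet? r (idx : Int)).getD '-' ≠ '-' then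
      cnt :: pvFwdA rest r (idx + 1) (cnt + 1)
    else (-1) :: pvFwdA rest r (idx + 1) cnt

-- A's reverse loop: fuel n+1 means current idx = n; aln_str[idx] is always in range here
-- (coord_list and aln_str have equal length), so getD's default is unreachable
def pvRevFix (aln : List Char) (coords : List Int) : Nat → List Int
  | 0 => coords
  | n + 1 => if aln.getD n 'x' = ' ' then pvRevFix aln (coords.set n (-1)) n else coords

def make_coordinates (aln_str : String) (ref_str : String) : List Int :=
  let cl := pvFwdA aln_str.toList ref_str.toList 0 0
  pvRevFix aln_str.toList cl cl.length

-- ===== PORT B =====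
-- hand port of len(aln_str.rstrip(' ')): exact — drops the trailing ' ' characters
def pvRstripLen (l : List Char) : Nat := (l.reverse.dropWhile (fun c => c == ' ')).length

-- B's single pass; ref_str[idx] ported with pyGet? (none defaulted to '-' as in port A)
def pvLoopB (l : List Char) (r : List Char) (idx : Nat) (last : Int) (cnt : Int) : List Int :=
  match l with
  | [] => []
  | c :: rest =>
    if (idx : Int) > last then (-1) :: pvLoopB rest r (idx + 1) last cnt
    else if (c ≠ ' ' || (PySem.List.pyGet? r (idx : Int)).getD '-' ≠ '-') then
      cnt :: pvLoopB rest r (idx + 1) last (cnt + 1)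
    else (-1) :: pvLoopB rest r (idx + 1) last cnt

def make_coordinates_alt (aln_str : String) (ref_str : String) : List Int :=
  pvLoopB aln_str.toList ref_str.toList 0 ((pvRstripLen aln_str.toList : Int) - 1) 0

-- ===== PRECONDITION & SPEC =====
-- Pre_ excludes exactly the inputs where Python A raises IndexError: a ' ' in aln_str at an
-- index not smaller than len(ref_str)
def Pre_make_coordinates (aln_str : String) (ref_str : String) : Prop :=
  ∀ i : Fin aln_str.toList.length, aln_str.toList.get i = ' ' → (i : Nat) < ref_str.toList.length
instance (aln_str : String) (ref_str : String) : Decidable (Pre_make_coordinates aln_str ref_str) := by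
  unfold Pre_make_coordinates; infer_instance
def pvWitness_make_coordinates : String × String := ("AC G", "ACTG")

def Spec_make_coordinates (aln_str : String) (ref_str : String) (out : List Int) : Prop := out = make_coordinates_alt aln_str ref_str
instance (aln_str : String) (ref_str : String) (out : List Int) : Decidable (Spec_make_coordinates aln_str ref_str out) := by unfold Spec_make_coordinates; infer_instance

-- ===== CLAIM (what is proved, stated in full; the proofs are below) =====
def Claim_equal_make_coordinates : Prop := ∀ (aln_str : String) (ref_str : String), Dom_make_coordinates aln_str ref_str → Pre_make_coordinates aln_str ref_str → Spec_make_coordinates aln_str ref_str (make_coordinates aln_str ref_str)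

-- ===== LEMMAS AND PROOFS =====

lemma pvFwdA_length (l r : List Char) (idx : Nat) (cnt : Int) :
    (pvFwdA l r idx cnt).length = l.length := by
  induction l generalizing idx cnt with
  | nil => rfl
  | cons c rest ih => simp only [pvFwdA]; split_ifs <;> simp [ih]

lemma pvFwdA_append (x y : List Char) (r : List Char) (idx : Nat) (cnt : Int) :
    ∃ c', pvFwdA (x ++ y) r idx cnt = pvFwdA x r idx cnt ++ pvFwdA y r (idx + x.length) c' := by
  induction x generalizing idx cnt with
  | nil => exact ⟨cnt, by simp [pvFwdA]⟩
  | cons c rest ih =>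
    have hidx : idx + (c :: rest).length = (idx + 1) + rest.length := by
      simp only [List.length_cons]; omega
    simp only [List.cons_append, pvFwdA, hidx]
    split_ifs with h1 h2
    · obtain ⟨c', hc'⟩ := ih (idx + 1) (cnt + 1)
      exact ⟨c', by rw [hc', List.cons_append]⟩
    · obtain ⟨c', hc'⟩ := ih (idx + 1) (cnt + 1)
      exact ⟨c', by rw [hc', List.cons_append]⟩
    · obtain ⟨c', hc'⟩ := ih (idx + 1) cnt
      exact ⟨c', by rw [hc', List.cons_append]⟩

lemma pvLoopB_tail (y : List Char) (r : List Char) (idx : Nat) (last : Int) (cnt : Int)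
    (h : last < (idx : Int)) :
    pvLoopB y r idx last cnt = List.replicate y.length (-1) := by
  induction y generalizing idx cnt with
  | nil => rfl
  | cons c rest ih =>
    simp only [pvLoopB, if_pos h]
    rw [ih (idx + 1) cnt (by push_cast; omega)]
    simp [List.replicate_succ]

lemma pvLoopB_split (x y : List Char) (r : List Char) (idx : Nat) (cnt : Int) (last : Int)
    (h : last = (idx : Int) + x.length - 1) :
    pvLoopB (x ++ y) r idx last cnt
      = pvFwdA x r idx cnt ++ List.replicate y.length (-1) := by
  induction x generalizing idx cnt last with
  | nil =>
    simp only [List.nil_append, pvFwdA]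
    rw [pvLoopB_tail _ _ _ _ _ (by simp at h; omega)]
  | cons c rest ih =>
    have h' : last = ((idx + 1 : Nat) : Int) + rest.length - 1 := by
      simp only [List.length_cons] at h; push_cast at h ⊢; omega
    simp only [List.cons_append, pvLoopB, pvFwdA]
    rw [if_neg (by push_cast at h' ⊢; omega)]
    by_cases hc : c = ' '
    · by_cases hr : (r[idx]?.getD '-') = '-'
      · rw [if_neg (by simp [PySem.List.pyGet?_natCast, hc, hr]),
          if_neg (by simp [hc]), if_neg (by simp [PySem.List.pyGet?_natCast, hr])]
        rw [ih (idx + 1) cnt last h']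
        simp
      · rw [if_pos (by simp [PySem.List.pyGet?_natCast, hc, hr]),
          if_neg (by simp [hc]), if_pos (by simp [PySem.List.pyGet?_natCast, hr])]
        rw [ih (idx + 1) (cnt + 1) last h']
        simp
    · rw [if_pos (by simp [hc]), if_pos (by simp [hc])]
      rw [ih (idx + 1) (cnt + 1) last h']
      simp

lemma set_middle (u s z : List Int) (i : Nat) (v : Int) (hi : i < s.length) :
    (u ++ s ++ z).set (u.length + i) v = u ++ s.set i v ++ z := by
  rw [List.append_assoc, List.append_assoc, List.set_append_right _ _ (by omega),
    List.set_append_left _ _ (by simpa using hi)]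
  simp

lemma set_last (w : List Int) (a v : Int) : (w ++ [a]).set w.length v = w ++ [v] := by
  rw [List.set_append_right _ _ (le_refl _)]
  simp

lemma pvRevFix_spec (x y : List Char) (u t z : List Int)
    (hu : u.length = x.length) (hty : t.length ≤ y.length)
    (hy : ∀ c ∈ y, c = ' ')
    (hx : x = [] ∨ ∀ h : x ≠ [], x.getLast h ≠ ' ') :
    pvRevFix (x ++ y) (u ++ t ++ z) (x.length + t.length)
      = u ++ List.replicate t.length (-1) ++ z := by
  induction t using List.reverseRecOn generalizing z with
  | nil =>
    simp only [List.length_nil, Nat.add_zero, List.append_nil, List.replicate_zero]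
    rcases hx with hx | hx
    · subst hx; simp at hu; simp [hu, pvRevFix]
    · match x, hx with
      | [], hx => simp [pvRevFix]
      | (c :: x'), hx =>
        have hne : (c :: x') ≠ [] := by simp
        have hlen : (c :: x').length = x'.length + 1 := by simp
        rw [hlen, pvRevFix]
        have hget : (c :: x' ++ y).getD x'.length 'x' = (c :: x').getLast hne := by
          rw [List.getD_eq_getElem?_getD, List.getElem?_append_left (by simp)]
          rw [List.getLast_eq_getElem]
          simp
          rfl
        rw [hget, if_neg (hx hne)]
  | append_singleton w a ih =>
    have hwlt : w.length < y.length := by simpa using hty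
    simp only [List.length_append, List.length_singleton]
    have hfuel : x.length + (w.length + 1) = (x.length + w.length) + 1 := by omega
    rw [hfuel, pvRevFix]
    have hget : (x ++ y).getD (x.length + w.length) 'x' = ' ' := by
      rw [List.getD_eq_getElem?_getD, List.getElem?_append_right (by omega)]
      have : x.length + w.length - x.length = w.length := by omega
      rw [this, List.getElem?_eq_getElem hwlt]
      exact hy _ (List.getElem_mem hwlt)
    rw [hget, if_pos rfl]
    have hset : (u ++ (w ++ [a]) ++ z).set (x.length + w.length) (-1)
        = u ++ w ++ ((-1) :: z) := by
      rw [← hu, set_middle u (w ++ [a]) z w.length (-1) (by simp), set_last]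
      simp
    rw [hset, ih ((-1) :: z) (by omega)]
    rw [List.replicate_succ']
    simp

-- decomposition of a char list at the rstrip(' ') boundary
lemma rstrip_decomp (l : List Char) :
    ∃ x y, l = x ++ y ∧ x.length = pvRstripLen l ∧ (∀ c ∈ y, c = ' ') ∧
      (x = [] ∨ ∀ h : x ≠ [], x.getLast h ≠ ' ') := by
  refine ⟨l.rdropWhile (fun c => c == ' '), l.rtakeWhile (fun c => c == ' '),
    (List.rdropWhile_append_rtakeWhile (p := fun c => c == ' ') (l := l)).symm, ?_, ?_, ?_⟩
  · simp [List.rdropWhile, pvRstripLen]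
  · intro c hc
    simpa using List.mem_rtakeWhile_imp hc
  · by_cases hd : l.rdropWhile (fun c => c == ' ') = []
    · left; exact hd
    · right
      intro h
      have := List.rdropWhile_last_not (fun c => c == ' ') l h
      simpa using this

-- ===== VERDICT (by name: the statement is the Claim_ definition above) =====
theorem make_coordinates_spec : Claim_equal_make_coordinates := by
  unfold Claim_equal_make_coordinates
  intro a rf _ _
  unfold Spec_make_coordinates make_coordinates make_coordinates_alt
  obtain ⟨x, y, hl, hk, hy, hx⟩ := rstrip_decomp a.toList
  obtain ⟨c', hc'⟩ := pvFwdA_append x y rf.toList 0 0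
  simp only [Nat.zero_add] at hc'
  show pvRevFix a.toList (pvFwdA a.toList rf.toList 0 0) (pvFwdA a.toList rf.toList 0 0).length
      = pvLoopB a.toList rf.toList 0 ((pvRstripLen a.toList : Int) - 1) 0
  rw [hl] at hk ⊢
  rw [hc']
  have hty : (pvFwdA y rf.toList x.length c').length = y.length := pvFwdA_length _ _ _ _
  have hfuel : (pvFwdA x rf.toList 0 0 ++ pvFwdA y rf.toList x.length c').length
      = x.length + (pvFwdA y rf.toList x.length c').length := by
    simp [pvFwdA_length]
  rw [hfuel]
  rw [show pvFwdA x rf.toList 0 0 ++ pvFwdA y rf.toList x.length c'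
      = pvFwdA x rf.toList 0 0 ++ pvFwdA y rf.toList x.length c' ++ [] from (List.append_nil _).symm]
  rw [pvRevFix_spec x y _ _ [] (pvFwdA_length _ _ _ _) (le_of_eq hty) hy hx]
  rw [hty, ← hk]
  rw [pvLoopB_split x y rf.toList 0 0 _ (by push_cast; ring)]
  simp
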